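-- pv_equiv track=rewrite | github.com/Bullish-Design/solitary-forge | src/solitary_forge/generators/dockerfile.py | _optimize_run_commands
-- ===== SOURCE A (Python) =====
-- def _optimize_run_commands(content: str) -> str:
--     """Combine consecutive RUN commands to reduce layers."""
--     lines = content.split('\n')
--     optimized_lines = []
--     run_buffer = []
--
--     for line in lines:
--         stripped = line.strip()
--         if stripped.startswith('RUN '):
--             run_buffer.append(stripped[4:])  # Remove 'RUN '
--         else:
--             if run_buffer:
--                 # Combine buffered RUN commands
--                 combined_run = "RUN " + " && \\\n    ".join(run_buffer)
--                 optimized_lines.append(combined_run)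
--                 run_buffer = []
--             optimized_lines.append(line)
--
--     # Handle any remaining RUN commands
--     if run_buffer:
--         combined_run = "RUN " + " && \\\n    ".join(run_buffer)
--         optimized_lines.append(combined_run)
--
--     return '\n'.join(optimized_lines)
-- ===== SOURCE B (Python) =====
-- def _optimize_run_commands(content: str) -> str:
--     """Combine consecutive RUN commands: pairwise stencil — each line's joiner and
--     text are decided locally from (previous line's kind, current line's kind)."""
--     lines = content.split('\n')
--     tails = []
--     for line in lines:
--         s = line.strip()
--         tails.append(s[4:] if s.startswith('RUN ') else None)
--     pieces = []
--     for prev, line, tail in zip([None] + tails, lines, tails):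
--         if tail is None:
--             pieces += ['\n', line]
--         elif prev is None:
--             pieces += ['\n', 'RUN ' + tail]
--         else:
--             pieces += [' && \\\n    ', tail]
--     return ''.join(pieces)[1:]
-- ===== Notes on version B (the rewrite author's own statement) =====
-- stated objective: alternative
-- what changed: Replaces A's buffer-and-flush loop (accumulate a whole RUN group, then emit it) by a pairwise stencil: each line's connector and text are decided locally from the (previous, current) line kinds via a zip-with-previous, and the output is one flat concatenation with the leading separator sliced off.
import Mathlib
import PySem

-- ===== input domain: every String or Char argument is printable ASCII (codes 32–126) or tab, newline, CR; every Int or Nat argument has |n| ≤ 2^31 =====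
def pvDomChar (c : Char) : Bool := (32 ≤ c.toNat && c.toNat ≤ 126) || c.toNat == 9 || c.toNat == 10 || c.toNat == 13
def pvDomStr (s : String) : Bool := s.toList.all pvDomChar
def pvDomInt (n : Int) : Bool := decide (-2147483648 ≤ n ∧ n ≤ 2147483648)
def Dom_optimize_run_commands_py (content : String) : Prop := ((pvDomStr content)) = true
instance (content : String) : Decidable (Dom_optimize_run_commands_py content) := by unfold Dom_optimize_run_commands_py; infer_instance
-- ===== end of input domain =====

-- B replaces A's buffer-and-flush grouping by a local pairwise stencil (each line's
-- connector and text decided from the previous/current line kinds); objective: alternative.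

-- ===== PORT A =====
-- literal transliteration of A: fold over the lines with state (optimized_lines, run_buffer)
def optimize_run_commands_py (content : String) : String :=
  let lines := (PySem.Str.split? content "\n").getD []   -- sep ≠ "", so split? is never none
  let st := lines.foldl (fun (st : List String × List String) line =>
    let stripped := PySem.Str.strip line
    if PySem.Str.startswith stripped "RUN " then
      (st.1, st.2 ++ [PySem.Str.slice stripped (some 4) none])
    else if st.2 ≠ [] then
      (st.1 ++ ["RUN " ++ PySem.Str.join " && \\\n    " st.2] ++ [line], [])
    else
      (st.1 ++ [line], st.2)) ([], [])
  let final := if st.2 ≠ [] then st.1 ++ ["RUN " ++ PySem.Str.join " && \\\n    " st.2] else st.1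
  PySem.Str.join "\n" final

-- ===== PORT B =====
def optimize_run_commands_py_alt (content : String) : String :=
  let lines := (PySem.Str.split? content "\n").getD []   -- sep ≠ "", so split? is never none
  -- tails[i] = stripped[4:] if line i is a RUN line else None
  let tails := lines.foldl (fun (acc : List (Option String)) line =>
    let s := PySem.Str.strip line
    acc ++ [if PySem.Str.startswith s "RUN " then some (PySem.Str.slice s (some 4) none) else none]) []
  -- zip-with-previous stencil: connector + text per line, decided locally
  let pieces := ((none :: tails).zip (lines.zip tails)).foldl
    (fun (acc : List String) p =>
      match p.2.2 with
      | none => acc ++ ["\n", p.2.1]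
      | some t => match p.1 with
        | none => acc ++ ["\n", "RUN " ++ t]
        | some _ => acc ++ [" && \\\n    ", t]) []
  PySem.Str.slice (PySem.Str.join "" pieces) (some 1) none   -- ''.join(pieces)[1:]

-- ===== PRECONDITION & SPEC =====
def Spec_optimize_run_commands_py (content : String) (out : String) : Prop := out = optimize_run_commands_py_alt content
instance (content : String) (out : String) : Decidable (Spec_optimize_run_commands_py content out) := by unfold Spec_optimize_run_commands_py; infer_instance

-- ===== CLAIM (what is proved, stated in full; the proofs are below) =====
def Claim_equal_optimize_run_commands_py : Prop := ∀ (content : String), Dom_optimize_run_commands_py content → Spec_optimize_run_commands_py content (optimize_run_commands_py content)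

-- ===== LEMMAS AND PROOFS =====
-- proof-only helpers
def pvIsRunAlt (l : String) : Bool := PySem.Str.startswith (PySem.Str.strip l) "RUN "
def pvS4 (l : String) : String := PySem.Str.slice (PySem.Str.strip l) (some 4) none
def pvComb (buf : List String) : String := "RUN " ++ PySem.Str.join " && \\\n    " buf
def pvFlush (buf : List String) : List String := if buf ≠ [] then [pvComb buf] else []
-- pvTail? is definitionally B's per-line classifier
def pvTail? (l : String) : Option String :=
  let s := PySem.Str.strip l
  if PySem.Str.startswith s "RUN " then some (PySem.Str.slice s (some 4) none) else none
-- head-recursive characterisation of A's buffer-and-flush loop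
def pvMerge : List String → List String → List String
  | buf, [] => pvFlush buf
  | buf, l :: ls =>
    if pvIsRunAlt l then pvMerge (buf ++ [pvS4 l]) ls
    else pvFlush buf ++ l :: pvMerge [] ls
-- pvStepA is definitionally A's loop body
def pvStepA (st : List String × List String) (line : String) : List String × List String :=
  if pvIsRunAlt line then (st.1, st.2 ++ [pvS4 line])
  else if st.2 ≠ [] then (st.1 ++ [pvComb st.2] ++ [line], [])
  else (st.1 ++ [line], st.2)
-- B's per-line stencil body, the flatMap form of B's pieces loop
def pvPiece (p : Option String × String × Option String) : List String :=
  match p.2.2 with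
  | none => ["\n", p.2.1]
  | some t => match p.1 with
    | none => ["\n", "RUN " ++ t]
    | some _ => [" && \\\n    ", t]
-- recursive characterisation of B's stencil output (as a char list)
def pvSten : Bool → List String → List Char
  | _, [] => []
  | prev, l :: ls =>
    match pvTail? l with
    | none => ("\n" : String).toList ++ l.toList ++ pvSten false ls
    | some t =>
      if prev then (" && \\\n    " : String).toList ++ t.toList ++ pvSten true ls
      else ("\n" : String).toList ++ ("RUN " ++ t).toList ++ pvSten true ls
-- '\n'-prefixed concatenation of a list of lines
def pvPre : List String → List Char
  | [] => []
  | x :: xs => '\n' :: x.toList ++ pvPre xs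

lemma pvNl : ("\n" : String).toList = ['\n'] := rfl

lemma pvTail?_none {l : String} (h : pvTail? l = none) : pvIsRunAlt l = false := by
  simp [pvTail?] at h
  simpa [pvIsRunAlt] using h

lemma pvTail?_some {l : String} {t : String} (h : pvTail? l = some t) :
    pvIsRunAlt l = true ∧ pvS4 l = t := by
  simp [pvTail?] at h
  exact ⟨by simpa [pvIsRunAlt] using h.1, by simpa [pvS4] using h.2⟩

-- the port lambdas are the named helpers
lemma pvStepA_eq : (fun (st : List String × List String) line =>
    let stripped := PySem.Str.strip line
    if PySem.Str.startswith stripped "RUN " then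
      (st.1, st.2 ++ [PySem.Str.slice stripped (some 4) none])
    else if st.2 ≠ [] then
      (st.1 ++ ["RUN " ++ PySem.Str.join " && \\\n    " st.2] ++ [line], [])
    else
      (st.1 ++ [line], st.2)) = pvStepA := rfl

lemma pvTails_eq : (fun (acc : List (Option String)) line =>
    let s := PySem.Str.strip line
    acc ++ [if PySem.Str.startswith s "RUN " then some (PySem.Str.slice s (some 4) none) else none])
    = (fun (acc : List (Option String)) line => acc ++ [pvTail? line]) := rfl

lemma pvPieces_eq : (fun (acc : List String) (p : Option String × String × Option String) =>
      match p.2.2 with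
      | none => acc ++ ["\n", p.2.1]
      | some t => match p.1 with
        | none => acc ++ ["\n", "RUN " ++ t]
        | some _ => acc ++ [" && \\\n    ", t])
    = (fun (acc : List String) p => acc ++ pvPiece p) := by
  funext acc p
  obtain ⟨a, b, c⟩ := p
  cases c with
  | none => rfl
  | some t => cases a with
    | none => rfl
    | some _ => rfl

lemma pvComb_def (b : List String) :
    "RUN " ++ PySem.Str.join " && \\\n    " b = pvComb b := rfl

set_option maxHeartbeats 1000000 in
lemma pvFoldA_eq_merge : ∀ (ls acc buf : List String),
    (if (ls.foldl pvStepA (acc, buf)).2 ≠ [] then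
      (ls.foldl pvStepA (acc, buf)).1 ++ [pvComb (ls.foldl pvStepA (acc, buf)).2]
     else (ls.foldl pvStepA (acc, buf)).1) = acc ++ pvMerge buf ls := by
  intro ls
  induction ls with
  | nil =>
    intro acc buf
    simp only [List.foldl_nil, pvMerge, pvFlush]
    by_cases hb : buf = [] <;> simp [hb]
  | cons l ls ih =>
    intro acc buf
    simp only [List.foldl_cons, pvMerge]
    by_cases h : pvIsRunAlt l
    · rw [if_pos h]
      have hs : pvStepA (acc, buf) l = (acc, buf ++ [pvS4 l]) := by
        simp [pvStepA, h]
      rw [hs, ih]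
    · rw [if_neg h]
      by_cases hb : buf = []
      · subst hb
        have hs : pvStepA (acc, []) l = (acc ++ [l], []) := by
          simp [pvStepA, h]
        rw [hs, ih]
        simp [pvFlush]
      · have hs : pvStepA (acc, buf) l = (acc ++ [pvComb buf] ++ [l], []) := by
          simp [pvStepA, h, hb]
        rw [hs, ih]
        simp [pvFlush, hb]

lemma pvJoin_append_singleton (sep y : List Char) :
    ∀ (xs : List (List Char)), xs ≠ [] →
    PySem.Chars.join sep (xs ++ [y]) = PySem.Chars.join sep xs ++ sep ++ y := by
  intro xs
  induction xs with
  | nil => intro h; exact absurd rfl h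
  | cons a xs ih =>
    intro _
    cases xs with
    | nil => simp [PySem.Chars.join_cons_cons, PySem.Chars.join_singleton]
    | cons b rest =>
      have h2 := ih (by simp)
      simp only [List.cons_append] at h2 ⊢
      rw [PySem.Chars.join_cons_cons, h2, PySem.Chars.join_cons_cons]
      simp [List.append_assoc]

lemma pvJoin_nil_flatten : ∀ (parts : List (List Char)),
    PySem.Chars.join [] parts = parts.flatten := by
  intro parts
  induction parts with
  | nil => simp [PySem.Chars.join_nil]
  | cons p rest ih =>
    cases rest with
    | nil => simp [PySem.Chars.join_singleton]
    | cons q r =>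
      rw [PySem.Chars.join_cons_cons]
      simp [ih]

-- A's merged lines, '\n'-prefixed, equal B's stencil output
set_option maxHeartbeats 1000000 in
lemma pvMerge_sten : ∀ (ls : List String),
    (pvPre (pvMerge [] ls) = pvSten false ls) ∧
    (∀ buf, buf ≠ [] →
      pvPre (pvMerge buf ls) =
      '\n' :: ("RUN " : String).toList ++
        PySem.Chars.join (" && \\\n    " : String).toList (buf.map String.toList) ++
        pvSten true ls) := by
  intro ls
  induction ls with
  | nil =>
    constructor
    · simp [pvMerge, pvFlush, pvSten, pvPre]
    · intro buf hb
      show pvPre (pvFlush buf) = _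
      simp [pvFlush, hb, pvPre, pvComb, pvSten, String.toList_append,
        PySem.Str.toList_join]
  | cons l ls ih =>
    obtain ⟨ih0, ihb⟩ := ih
    have step : ∀ buf, pvMerge buf (l :: ls) =
        if pvIsRunAlt l then pvMerge (buf ++ [pvS4 l]) ls
        else pvFlush buf ++ l :: pvMerge [] ls := fun _ => rfl
    constructor
    · cases h : pvTail? l with
      | none =>
        rw [step, pvTail?_none h]
        simp only [Bool.false_eq_true, if_false, pvFlush, ne_eq, not_true_eq_false]
        simp only [List.nil_append, pvPre, ih0]
        simp [pvSten, h, pvNl]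
      | some t =>
        obtain ⟨hrun, hs4⟩ := pvTail?_some h
        rw [step, hrun, if_pos rfl]
        simp only [List.nil_append, hs4]
        rw [(ihb [t] (by simp))]
        simp [pvSten, h, pvNl, PySem.Chars.join_singleton, String.toList_append]
    · intro buf hb
      cases h : pvTail? l with
      | none =>
        rw [step, pvTail?_none h]
        simp only [Bool.false_eq_true, if_false, pvFlush, ne_eq, hb, not_false_iff, if_true]
        simp only [List.singleton_append, pvPre, ih0, pvComb, String.toList_append,
          PySem.Str.toList_join]
        simp [pvSten, h, pvNl]
      | some t =>
        obtain ⟨hrun, hs4⟩ := pvTail?_some h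
        rw [step, hrun, if_pos rfl, hs4]
        rw [ihb (buf ++ [t]) (by simp)]
        rw [List.map_append, List.map_cons, List.map_nil]
        rw [pvJoin_append_singleton _ t.toList (List.map String.toList buf) (by simp [hb])]
        simp [pvSten, h, List.append_assoc]

lemma pvPre_cons : ∀ (xs : List String) (x : String),
    pvPre (x :: xs) = '\n' :: PySem.Chars.join ['\n'] ((x :: xs).map String.toList) := by
  intro xs
  induction xs with
  | nil => intro x; simp [pvPre, PySem.Chars.join_singleton]
  | cons y xs ih =>
    intro x
    rw [show pvPre (x :: y :: xs) = '\n' :: (x.toList ++ pvPre (y :: xs)) from rfl, ih y]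
    simp only [List.map_cons]
    rw [PySem.Chars.join_cons_cons]
    simp

lemma pvJoin_eq_tail_pre (xs : List String) :
    PySem.Chars.join ['\n'] (xs.map String.toList) = (pvPre xs).tail := by
  cases xs with
  | nil => simp [pvPre, PySem.Chars.join_nil]
  | cons x xs => rw [pvPre_cons]; simp

-- B's zip-with-previous pieces, flattened, equal the stencil recursion
set_option maxHeartbeats 1000000 in
lemma pvZip_sten : ∀ (ls : List String) (prev : Option String),
    (List.map String.toList
      (((prev :: ls.map pvTail?).zip (ls.zip (ls.map pvTail?))).flatMap pvPiece)).flatten =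
    pvSten prev.isSome ls := by
  intro ls
  induction ls with
  | nil => intro prev; simp [pvSten]
  | cons l ls ih =>
    intro prev
    simp only [List.map_cons, List.zip_cons_cons, List.flatMap_cons, List.map_append,
      List.flatten_append]
    rw [ih (pvTail? l)]
    cases h : pvTail? l with
    | none =>
      simp [pvPiece, h, pvSten]
    | some t =>
      cases prev with
      | none => simp [pvPiece, h, pvSten]
      | some p => simp [pvPiece, h, pvSten]

lemma pvFlatMap_singleton {α β : Type} (f : α → β) : ∀ (l : List α),
    l.flatMap (fun x => [f x]) = l.map f := by
  intro l
  induction l with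
  | nil => rfl
  | cons x xs ih => simp [List.flatMap_cons, ih]

-- ===== VERDICT (by name: the statement is the Claim_ definition above) =====
set_option maxHeartbeats 2000000 in
theorem optimize_run_commands_py_spec : Claim_equal_optimize_run_commands_py := by
  intro content _
  show optimize_run_commands_py content = optimize_run_commands_py_alt content
  apply String.toList_inj.mp
  unfold optimize_run_commands_py optimize_run_commands_py_alt
  rw [pvStepA_eq, pvTails_eq, pvPieces_eq]
  simp only [pvComb_def]
  set lines := (PySem.Str.split? content "\n").getD [] with hlines
  rw [show (lines.foldl (fun (acc : List (Option String)) line => acc ++ [pvTail? line]) []) =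
        lines.map pvTail? by
      rw [PySem.List.foldl_append_eq_flatMap (fun line => [pvTail? line]) lines [],
        pvFlatMap_singleton]
      simp]
  rw [PySem.List.foldl_append_eq_flatMap pvPiece, List.nil_append]
  rw [pvFoldA_eq_merge lines [] [], List.nil_append]
  rw [PySem.Str.toList_join, pvNl, pvJoin_eq_tail_pre]
  rw [PySem.Str.toList_slice, PySem.Chars.slice_eq_listSlice, PySem.List.slice_from_one]
  rw [PySem.Str.toList_join, show ("" : String).toList = ([] : List Char) from rfl,
    pvJoin_nil_flatten, pvZip_sten lines none]
  rw [(pvMerge_sten lines).1]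
  rfl
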